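-- pv_equiv track=rewrite | github.com/pypi-data/pypi-mirror-398 | packages/nexios_contrib/nexios_contrib-0.3.1.tar.gz/nexios_contrib-0.3.1/nexios_contrib/proxy/helper.py | parse_forwarded_header
-- ===== SOURCE A (Python) =====
-- def parse_forwarded_header(forwarded_header: str) -> dict:
--     """
--     Parse the Forwarded header according to RFC 7239.
--
--     Args:
--         forwarded_header: The Forwarded header value.
--
--     Returns:
--         dict: Parsed forwarded parameters.
--     """
--     result = {}
--     if not forwarded_header:
--         return result
--
--     # Split by comma and semicolon
--     for forwarded in forwarded_header.split(','):
--         forwarded = forwarded.strip()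
--         if not forwarded:
--             continue
--
--         params = {}
--         current_param = ""
--         current_value = ""
--
--         i = 0
--         while i < len(forwarded):
--             char = forwarded[i]
--
--             if char == '=':
--                 current_param = current_value.strip()
--                 current_value = ""
--             elif char == ';':
--                 if current_param:
--                     params[current_param] = current_value.strip()
--                 current_param = ""
--                 current_value = ""
--             else:
--                 current_value += char
--
--             i += 1
--
--         if current_param:
--             params[current_param] = current_value.strip()
--
--         # Process standard forwarded parameters
--         for key, value in params.items():
--             if key.lower() == 'for':
--                 result['for'] = value
--             elif key.lower() == 'by':
--                 result['by'] = value
--             elif key.lower() == 'host':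
--                 result['host'] = value
--             elif key.lower() == 'proto':
--                 result['proto'] = value
--
--     return result
-- ===== SOURCE B (Python) =====
-- def parse_forwarded_header(forwarded_header: str) -> dict:
--     """Parse the Forwarded header (RFC 7239) into its standard parameters."""
--     result = {}
--     for segment in forwarded_header.split(','):
--         segment = segment.strip()
--         if not segment:
--             continue
--         params = {}
--         for part in segment.split(';'):
--             key, sep, value = part.partition('=')
--             key = key.strip()
--             if sep and key:
--                 params[key] = value.strip()
--         for key, value in params.items():
--             k = key.lower()
--             if k in ('for', 'by', 'host', 'proto'):
--                 result[k] = value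
--     return result
-- ===== Notes on version B (the rewrite author's own statement) =====
-- stated objective: simpler
-- what changed: Replaces A's index-driven character-by-character state machine (manual current_param/current_value accumulation with per-char dispatch) by declarative split-based parsing (split on commas and semicolons, str.partition at the first equals sign); Pre_ excludes headers where a semicolon-separated parameter contains more than one equals sign — malformed under RFC 7239, where A's last-wins split and B's first-split are both arbitrary.
-- outside the precondition, e.g. on parse_forwarded_header('for=a=b'): A returns {}, B returns {'for': 'a=b'}; on parse_forwarded_header('x=for=1.2.3.4'): A returns {'for': '1.2.3.4'}, B returns {}
import Mathlib
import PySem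

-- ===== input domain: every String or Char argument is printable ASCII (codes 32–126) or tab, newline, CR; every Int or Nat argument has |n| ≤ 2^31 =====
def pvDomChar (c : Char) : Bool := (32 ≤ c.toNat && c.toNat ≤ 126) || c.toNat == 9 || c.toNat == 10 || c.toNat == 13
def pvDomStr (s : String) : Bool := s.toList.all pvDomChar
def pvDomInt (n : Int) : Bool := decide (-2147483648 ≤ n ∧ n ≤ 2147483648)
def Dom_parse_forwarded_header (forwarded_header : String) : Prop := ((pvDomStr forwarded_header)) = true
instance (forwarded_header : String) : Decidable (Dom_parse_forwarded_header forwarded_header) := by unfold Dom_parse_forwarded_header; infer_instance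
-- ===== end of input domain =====

-- B parses each parameter by splitting at its FIRST equals sign (str.partition) instead of A's
-- char-by-char state machine; Pre_ excludes malformed parameters holding several equals signs,
-- on which the two splits differ.

-- ===== PORT A =====
-- A's "if current_param: params[current_param] = current_value.strip()" (this code appears twice in A)
def pvFlush (params : PySem.Dict (List Char) (List Char)) (cp cv : List Char) :
    PySem.Dict (List Char) (List Char) :=
  if cp ≠ [] then params.insert cp (PySem.Chars.strip cv) else params

-- A's `while i < len(forwarded)` character loop; state = (params, current_param, current_value)
def pvLoopA : List Char → PySem.Dict (List Char) (List Char) → List Char → List Char →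
    PySem.Dict (List Char) (List Char) × List Char × List Char
  | [], params, cp, cv => (params, cp, cv)
  | c :: rest, params, cp, cv =>
    if c = '=' then pvLoopA rest params (PySem.Chars.strip cv) []
    else if c = ';' then pvLoopA rest (pvFlush params cp cv) [] []
    else pvLoopA rest params cp (cv ++ [c])

def parse_forwarded_header (forwarded_header : String) : List (String × String) :=
  let result : PySem.Dict String String := PySem.Dict.empty
  if forwarded_header.toList = [] then result.items
  else
    ((PySem.Chars.splitOn forwarded_header.toList [',']).foldl (fun result seg =>
        let f := PySem.Chars.strip seg
        if f = [] then result
        else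
          let st := pvLoopA f PySem.Dict.empty [] []
          let params := pvFlush st.1 st.2.1 st.2.2
          params.items.foldl (fun r kv =>
            if PySem.Chars.lower kv.1 = "for".toList then r.insert "for" (String.ofList kv.2)
            else if PySem.Chars.lower kv.1 = "by".toList then r.insert "by" (String.ofList kv.2)
            else if PySem.Chars.lower kv.1 = "host".toList then r.insert "host" (String.ofList kv.2)
            else if PySem.Chars.lower kv.1 = "proto".toList then r.insert "proto" (String.ofList kv.2)
            else r) result) result).items

-- ===== PORT B =====
-- `key, sep, value = part.partition('=')` ported by hand (PySem has no partition): it is exact —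
-- key = chars before the first '=', sep nonempty iff '=' ∈ part, value = chars after the first '='.
def pvStepB (params : PySem.Dict (List Char) (List Char)) (part : List Char) :
    PySem.Dict (List Char) (List Char) :=
  let key := PySem.Chars.strip (part.takeWhile (· ≠ '='))
  if '=' ∈ part ∧ key ≠ [] then
    params.insert key (PySem.Chars.strip ((part.dropWhile (· ≠ '=')).tail))
  else params

def parse_forwarded_header_alt (forwarded_header : String) : List (String × String) :=
  ((PySem.Chars.splitOn forwarded_header.toList [',']).foldl (fun result seg0 =>
      let seg := PySem.Chars.strip seg0
      if seg = [] then result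
      else
        let params := (PySem.Chars.splitOn seg [';']).foldl pvStepB PySem.Dict.empty
        params.items.foldl (fun r kv =>
          let k := PySem.Chars.lower kv.1
          if k ∈ [("for".toList), ("by".toList), ("host".toList), ("proto".toList)] then
            r.insert (String.ofList k) (String.ofList kv.2)
          else r) result)
    PySem.Dict.empty).items

-- ===== PRECONDITION & SPEC =====
-- Pre_ excludes headers in which some semicolon-separated parameter contains more than one
-- equals sign (malformed under RFC 7239's token=value grammar): there A returns a value keyed on
-- the text between the LAST two equals signs while B splits at the FIRST one — both choices are
-- arbitrary on such input, and no maintainer would specify either.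
def Pre_parse_forwarded_header (forwarded_header : String) : Prop :=
  ∀ seg ∈ forwarded_header.toList.splitOn ',',
    ∀ p ∈ (PySem.Chars.strip seg).splitOn ';', p.count '=' ≤ 1

instance (forwarded_header : String) : Decidable (Pre_parse_forwarded_header forwarded_header) := by
  unfold Pre_parse_forwarded_header; infer_instance

def pvWitness_parse_forwarded_header : String := "for=192.0.2.60;proto=http, host=example.com"

def Spec_parse_forwarded_header (forwarded_header : String) (out : List (String × String)) : Prop := out = parse_forwarded_header_alt forwarded_header
instance (forwarded_header : String) (out : List (String × String)) : Decidable (Spec_parse_forwarded_header forwarded_header out) := by unfold Spec_parse_forwarded_header; infer_instance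

-- ===== CLAIM (what is proved, stated in full; the proofs are below) =====
def Claim_equal_parse_forwarded_header : Prop := ∀ (forwarded_header : String), Dom_parse_forwarded_header forwarded_header → Pre_parse_forwarded_header forwarded_header → Spec_parse_forwarded_header forwarded_header (parse_forwarded_header forwarded_header)

-- ===== LEMMAS AND PROOFS =====

def pvSKeys : List (List Char) := ["for".toList, "by".toList, "host".toList, "proto".toList]

-- structural single-character split (what Python's s.split(c) computes)
def pvSplitc (c0 : Char) : List Char → List (List Char)
  | [] => [[]]
  | c :: cs => if c = c0 then [] :: pvSplitc c0 cs
               else (c :: (pvSplitc c0 cs).headI) :: (pvSplitc c0 cs).tail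

lemma pvSplitc_eq_splitOn (c0 : Char) (l : List Char) : pvSplitc c0 l = l.splitOn c0 := by
  induction l with
  | nil => rfl
  | cons c cs ih =>
    obtain ⟨a, t, hs⟩ := List.ne_nil_iff_exists_cons.mp (List.splitOnP_ne_nil (· == c0) cs)
    rw [List.splitOn, List.splitOnP_cons]
    by_cases hc : c = c0
    · simp [pvSplitc, hc, ih, List.splitOn]
    · simp only [pvSplitc, beq_iff_eq, hc, if_false, ih, List.splitOn, hs]
      rfl

-- pvBadPiece p : the Bool form, on ONE ';'-piece, of D_'s inner condition
def pvBadPiece (p : List Char) : Bool :=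
  let fs := pvSplitc '=' p
  decide (3 ≤ fs.length) &&
    (pvSKeys.contains (PySem.Chars.lower (PySem.Chars.strip (fs.getD (fs.length - 2) []))) ||
     pvSKeys.contains (PySem.Chars.lower (PySem.Chars.strip fs.headI)))

lemma pvSplitc_ne_nil (c0 : Char) (l : List Char) : pvSplitc c0 l ≠ [] := by
  cases l with
  | nil => simp [pvSplitc]
  | cons c cs => simp only [pvSplitc]; split <;> simp

lemma pvSplitc_length (c0 : Char) (p : List Char) :
    (pvSplitc c0 p).length = p.count c0 + 1 := by
  induction p with
  | nil => rfl
  | cons c cs ih =>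
    by_cases hc : c = c0
    · simp [pvSplitc, hc, ih]
    · obtain ⟨a, t, hs⟩ := List.ne_nil_iff_exists_cons.mp (pvSplitc_ne_nil c0 cs)
      simp only [pvSplitc, if_neg hc, hs] at *
      simp [hc, ← ih]

lemma pvGo_nil (c0 : Char) (n : Nat) (cur : List Char) (acc : List (List Char)) :
    PySem.Chars.splitOn.go [c0] (n + 1) [] cur acc = (cur.reverse :: acc).reverse := by
  rw [PySem.Chars.splitOn.go]; omega

lemma pvGo_cons (c0 : Char) (n : Nat) (c : Char) (rest cur : List Char) (acc : List (List Char)) :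
    PySem.Chars.splitOn.go [c0] (n + 1) (c :: rest) cur acc =
      if c0 = c then PySem.Chars.splitOn.go [c0] n rest [] (cur.reverse :: acc)
      else PySem.Chars.splitOn.go [c0] n rest (c :: cur) acc := by
  rw [PySem.Chars.splitOn.go]; simp [List.isPrefixOf]

lemma pvGo_spec (c0 : Char) : ∀ (fuel : Nat) (l cur : List Char) (acc : List (List Char)),
    l.length < fuel →
    PySem.Chars.splitOn.go [c0] fuel l cur acc =
      acc.reverse ++ (cur.reverse ++ (pvSplitc c0 l).headI) :: (pvSplitc c0 l).tail := by
  intro fuel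
  induction fuel with
  | zero => intro l cur acc h; omega
  | succ n ih =>
    intro l cur acc h
    cases l with
    | nil => simp [pvGo_nil, pvSplitc]
    | cons c rest =>
      obtain ⟨h0, t0, hs⟩ := List.ne_nil_iff_exists_cons.mp (pvSplitc_ne_nil c0 rest)
      rw [pvGo_cons]
      by_cases hc : c0 = c
      · rw [if_pos hc, ih rest [] _ (by simp only [List.length_cons] at h; omega)]
        simp [pvSplitc, ← hc, hs]
      · rw [if_neg hc, ih rest (c :: cur) _ (by simp only [List.length_cons] at h; omega)]
        have : ¬ (c = c0) := fun h' => hc h'.symm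
        simp [pvSplitc, this, hs]

lemma pvSplitOn_single (c0 : Char) (l : List Char) :
    PySem.Chars.splitOn l [c0] = pvSplitc c0 l := by
  obtain ⟨h, t, hs⟩ := List.ne_nil_iff_exists_cons.mp (pvSplitc_ne_nil c0 l)
  unfold PySem.Chars.splitOn
  rw [pvGo_spec c0 (l.length + 1) l [] [] (by omega), hs]
  simp

-- the (current_param, current_value) state A's loop reaches after one ';'-free piece,
-- expressed through the piece's '='-fields
def pvPieceFinal (cp cv p : List Char) : List Char × List Char :=
  let fs := pvSplitc '=' p
  if fs.length < 2 then (cp, cv ++ fs.headI)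
  else (PySem.Chars.strip (if fs.length = 2 then cv ++ fs.headI else (fs[fs.length - 2]?).getD []),
        (fs[fs.length - 1]?).getD [])

lemma pvPieceFinal_nil (cp cv : List Char) : pvPieceFinal cp cv [] = (cp, cv) := by
  simp [pvPieceFinal, pvSplitc]

lemma pvGetD_cons (a : List Char) (s : List (List Char)) (k : Nat) (h1 : 1 ≤ k) :
    (((a :: s)[k]?).getD ([] : List Char)) = ((s[k - 1]?).getD []) := by
  obtain ⟨m, rfl⟩ : ∃ m, k = m + 1 := ⟨k - 1, by omega⟩
  simp

lemma pvPieceFinal_step (c : Char) (cp cv p : List Char) :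
    pvPieceFinal cp cv (c :: p) =
      if c = '=' then pvPieceFinal (PySem.Chars.strip cv) [] p
      else pvPieceFinal cp (cv ++ [c]) p := by
  obtain ⟨h, t, hs⟩ := List.ne_nil_iff_exists_cons.mp (pvSplitc_ne_nil '=' p)
  by_cases hc : c = '='
  · subst hc
    rw [if_pos rfl]
    have hfs : pvSplitc '=' ('=' :: p) = [] :: h :: t := by simp [pvSplitc, hs]
    unfold pvPieceFinal
    rw [hfs, hs]
    rcases t with _ | ⟨x, t⟩
    · simp
    · simp only [List.length_cons]
      rw [if_neg (by omega), if_neg (by omega), if_neg (by omega)]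
      by_cases h2 : t.length = 0
      · rcases List.length_eq_zero_iff.mp h2 with rfl
        simp
      · rw [if_neg (by omega)]
        have e1 : t.length + 1 + 1 + 1 - 2 = t.length + 1 := by omega
        have e2 : t.length + 1 + 1 + 1 - 1 = t.length + 2 := by omega
        have e3 : t.length + 1 + 1 - 2 = t.length := by omega
        have e4 : t.length + 1 + 1 - 1 = t.length + 1 := by omega
        rw [e1, e2, e3, e4]
        rw [pvGetD_cons _ _ (t.length + 1) (by omega), pvGetD_cons _ _ (t.length + 2) (by omega)]
        have e5 : t.length + 1 - 1 = t.length := by omega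
        have e6 : t.length + 2 - 1 = t.length + 1 := by omega
        rw [e5, e6]
  · rw [if_neg hc]
    have hfs : pvSplitc '=' (c :: p) = (c :: h) :: t := by simp [pvSplitc, hc, hs]
    unfold pvPieceFinal
    rw [hfs, hs]
    rcases t with _ | ⟨x, t⟩
    · simp
    · simp only [List.length_cons]
      rw [if_neg (by omega)]
      by_cases h2 : t.length = 0
      · rcases List.length_eq_zero_iff.mp h2 with rfl
        rw [if_pos (by decide), if_neg (by decide), if_pos (by decide)]
        simp [List.append_assoc]
      · rw [if_neg (by omega), if_neg (by omega), if_neg (by omega)]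
        have e1 : t.length + 1 + 1 - 2 = t.length := by omega
        have e2 : t.length + 1 + 1 - 1 = t.length + 1 := by omega
        rw [e1, e2]
        rw [pvGetD_cons _ _ t.length (by omega), pvGetD_cons _ _ (t.length + 1) (by omega),
            pvGetD_cons _ _ t.length (by omega), pvGetD_cons _ _ (t.length + 1) (by omega)]

-- A's loop, read piece by piece
def pvSegRun : PySem.Dict (List Char) (List Char) → List Char → List Char → List (List Char) →
    PySem.Dict (List Char) (List Char) × List Char × List Char
  | params, cp, cv, [] => (params, cp, cv)
  | params, cp, cv, [p] => (params, pvPieceFinal cp cv p)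
  | params, cp, cv, p :: q :: rest =>
    pvSegRun (pvFlush params (pvPieceFinal cp cv p).1 (pvPieceFinal cp cv p).2) [] [] (q :: rest)

lemma pvSegRun_cons (c : Char) (h : List Char) (t : List (List Char))
    (params : PySem.Dict (List Char) (List Char)) (cp cv : List Char) :
    pvSegRun params cp cv ((c :: h) :: t) =
      if c = '=' then pvSegRun params (PySem.Chars.strip cv) [] (h :: t)
      else pvSegRun params cp (cv ++ [c]) (h :: t) := by
  cases t <;> simp only [pvSegRun, pvPieceFinal_step] <;> split <;> rfl

lemma pvLoopA_eq_segRun : ∀ (cs : List Char) (params : PySem.Dict (List Char) (List Char))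
    (cp cv : List Char), pvLoopA cs params cp cv = pvSegRun params cp cv (pvSplitc ';' cs) := by
  intro cs
  induction cs with
  | nil => intro params cp cv; simp [pvLoopA, pvSplitc, pvSegRun, pvPieceFinal_nil]
  | cons c rest ih =>
    intro params cp cv
    obtain ⟨h, t, hs⟩ := List.ne_nil_iff_exists_cons.mp (pvSplitc_ne_nil ';' rest)
    by_cases he : c = '='
    · subst he
      have : pvSplitc ';' ('=' :: rest) = ('=' :: h) :: t := by simp [pvSplitc, hs]
      rw [this, pvSegRun_cons, if_pos rfl, ← hs, ← ih]
      simp [pvLoopA]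
    · by_cases hsemi : c = ';'
      · subst hsemi
        have : pvSplitc ';' (';' :: rest) = [] :: h :: t := by simp [pvSplitc, hs]
        rw [this]
        simp only [pvLoopA, if_neg (by decide : ¬(';' = '=')), if_true]
        rw [ih, hs]
        simp [pvSegRun, pvPieceFinal_nil]
      · have : pvSplitc ';' (c :: rest) = (c :: h) :: t := by simp [pvSplitc, hsemi, hs]
        rw [this, pvSegRun_cons, if_neg he, ← hs, ← ih]
        simp [pvLoopA, he, hsemi]

-- A's per-piece effect on params (what one ';'-piece contributes)
def pvStepA (params : PySem.Dict (List Char) (List Char)) (part : List Char) :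
    PySem.Dict (List Char) (List Char) :=
  let fields := pvSplitc '=' part
  if fields.length < 2 then params
  else
    let key := PySem.Chars.strip (fields.getD (fields.length - 2) [])
    if key = [] then params
    else params.insert key (PySem.Chars.strip (fields.getD (fields.length - 1) []))

lemma pvFlush_fresh (params : PySem.Dict (List Char) (List Char)) (p : List Char) :
    pvFlush params (pvPieceFinal [] [] p).1 (pvPieceFinal [] [] p).2 = pvStepA params p := by
  unfold pvStepA
  by_cases hl : (pvSplitc '=' p).length < 2
  · rw [if_pos hl]
    unfold pvPieceFinal
    rw [if_pos hl]
    simp [pvFlush]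
  · rw [if_neg hl]
    unfold pvPieceFinal
    rw [if_neg hl]
    dsimp only
    have hkey : (if (pvSplitc '=' p).length = 2 then [] ++ (pvSplitc '=' p).headI
        else ((pvSplitc '=' p)[(pvSplitc '=' p).length - 2]?).getD []) =
        ((pvSplitc '=' p)[(pvSplitc '=' p).length - 2]?).getD [] := by
      split
      · next h2 =>
        rw [List.nil_append, h2]
        cases hfs : pvSplitc '=' p
        · exact absurd hfs (pvSplitc_ne_nil '=' p)
        · simp
      · rfl
    rw [hkey]
    unfold pvFlush
    simp only [List.getD_eq_getElem?_getD]
    by_cases hk : PySem.Chars.strip (((pvSplitc '=' p)[(pvSplitc '=' p).length - 2]?).getD []) = []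
    · rw [if_neg (by simpa using hk), if_pos hk]
    · rw [if_pos (by simpa using hk), if_neg hk]

lemma pvSegRun_fold : ∀ (ps : List (List Char)) (params : PySem.Dict (List Char) (List Char)),
    ps ≠ [] →
    pvFlush (pvSegRun params [] [] ps).1 (pvSegRun params [] [] ps).2.1
        (pvSegRun params [] [] ps).2.2 = ps.foldl pvStepA params := by
  intro ps
  induction ps with
  | nil => intro _ h; exact absurd rfl h
  | cons p rest ih =>
    intro params _
    cases rest with
    | nil => simpa [pvSegRun] using pvFlush_fresh params p
    | cons q r =>
      simp only [pvSegRun]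
      rw [ih _ (by simp), pvFlush_fresh]
      rfl

-- the whole per-segment params dict of A
lemma pvParams_eq (f : List Char) :
    pvFlush (pvLoopA f PySem.Dict.empty [] []).1 (pvLoopA f PySem.Dict.empty [] []).2.1
        (pvLoopA f PySem.Dict.empty [] []).2.2 =
      (pvSplitc ';' f).foldl pvStepA PySem.Dict.empty := by
  rw [pvLoopA_eq_segRun]
  exact pvSegRun_fold _ _ (pvSplitc_ne_nil ';' f)

-- the S-filter: the items a segment's params dict can contribute to the result
def pvPk (k : List Char) : Bool := pvSKeys.contains (PySem.Chars.lower k)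
def pvP (kv : List Char × List Char) : Bool := pvPk kv.1
def pvFilt (d : PySem.Dict (List Char) (List Char)) : List (List Char × List Char) :=
  d.items.filter pvP

lemma pvFilterMap_false (l : List (List Char × List Char)) (k v : List Char)
    (hk : pvPk k = false) :
    (l.map (fun p => if (p.1 == k) = true then (k, v) else p)).filter pvP = l.filter pvP := by
  induction l with
  | nil => rfl
  | cons q t ih =>
    simp only [List.map_cons]
    by_cases hq : q.1 = k
    · rw [show (if (q.1 == k) = true then (k, v) else q) = (k, v) from if_pos (by simpa using hq)]
      have h1 : pvP (k, v) = false := hk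
      have h2 : pvP q = false := by simp only [pvP, hq]; exact hk
      simp only [List.filter_cons, h1, h2, Bool.false_eq_true, if_false, ih]
    · rw [show (if (q.1 == k) = true then (k, v) else q) = q from if_neg (by simpa using hq)]
      simp only [List.filter_cons, ih]

lemma pvFilterMap_true (l : List (List Char × List Char)) (k v : List Char)
    (hk : pvPk k = true) :
    (l.map (fun p => if (p.1 == k) = true then (k, v) else p)).filter pvP =
      (l.filter pvP).map (fun p => if (p.1 == k) = true then (k, v) else p) := by
  induction l with
  | nil => rfl
  | cons q t ih =>
    simp only [List.map_cons]
    by_cases hq : q.1 = k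
    · rw [show (if (q.1 == k) = true then (k, v) else q) = (k, v) from if_pos (by simpa using hq)]
      have h1 : pvP (k, v) = true := hk
      have h2 : pvP q = true := by simp only [pvP, hq]; exact hk
      simp only [List.filter_cons, h1, h2, if_true, List.map_cons, ih]
      rw [show (if (q.1 == k) = true then (k, v) else q) = (k, v) from if_pos (by simpa using hq)]
    · rw [show (if (q.1 == k) = true then (k, v) else q) = q from if_neg (by simpa using hq)]
      cases h2 : pvP q
      · simp only [List.filter_cons, h2, Bool.false_eq_true, if_false, ih]
      · simp only [List.filter_cons, h2, if_true, List.map_cons, ih]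
        rw [show (if (q.1 == k) = true then (k, v) else q) = q from if_neg (by simpa using hq)]

lemma pvFilt_insert_false (d : PySem.Dict (List Char) (List Char)) (k v : List Char)
    (hk : pvPk k = false) : pvFilt (d.insert k v) = pvFilt d := by
  unfold pvFilt
  rw [PySem.Dict.items_insert]
  split
  · exact pvFilterMap_false d.items k v hk
  · rw [List.filter_append]
    have : pvP (k, v) = false := hk
    simp [this]

lemma pvMemKeys_filt (d : PySem.Dict (List Char) (List Char)) (k : List Char)
    (hk : pvPk k = true) : k ∈ d.keys ↔ k ∈ (pvFilt d).map (·.1) := by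
  show k ∈ d.items.map (·.1) ↔ _
  unfold pvFilt
  simp only [List.mem_map, List.mem_filter]
  constructor
  · rintro ⟨kv, hmem, hfst⟩
    exact ⟨kv, ⟨hmem, by show pvP kv = true; simp only [pvP, hfst, hk]⟩, hfst⟩
  · rintro ⟨kv, ⟨hmem, _⟩, hfst⟩
    exact ⟨kv, hmem, hfst⟩

lemma pvContains_congr (dA dB : PySem.Dict (List Char) (List Char)) (k : List Char)
    (hk : pvPk k = true) (h : pvFilt dA = pvFilt dB) : dA.contains k = dB.contains k := by
  rw [PySem.Dict.contains_eq_decide_mem_keys, PySem.Dict.contains_eq_decide_mem_keys]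
  simp only [decide_eq_decide]
  rw [pvMemKeys_filt dA k hk, pvMemKeys_filt dB k hk, h]

lemma pvFilt_insert_congr (dA dB : PySem.Dict (List Char) (List Char)) (k v : List Char)
    (h : pvFilt dA = pvFilt dB) : pvFilt (dA.insert k v) = pvFilt (dB.insert k v) := by
  cases hk : pvPk k
  · rw [pvFilt_insert_false dA k v hk, pvFilt_insert_false dB k v hk, h]
  · have hc := pvContains_congr dA dB k hk h
    unfold pvFilt
    rw [PySem.Dict.items_insert, PySem.Dict.items_insert, ← hc]
    split
    · show (dA.items.map _).filter pvP = (dB.items.map _).filter pvP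
      rw [pvFilterMap_true dA.items k v hk, pvFilterMap_true dB.items k v hk]
      show (pvFilt dA).map _ = (pvFilt dB).map _
      rw [h]
    · rw [List.filter_append, List.filter_append]
      show pvFilt dA ++ _ = pvFilt dB ++ _
      rw [h]

-- pvSplitc structure lemmas
lemma pvSplitc_headI_takeWhile (c0 : Char) (p : List Char) :
    (pvSplitc c0 p).headI = p.takeWhile (· ≠ c0) := by
  induction p with
  | nil => rfl
  | cons c cs ih =>
    simp only [pvSplitc]
    by_cases hc : c = c0
    · simp [hc]
    · simp [hc, ih]

lemma pvSplitc_not_mem (c0 : Char) (p : List Char) (h : c0 ∉ p) : pvSplitc c0 p = [p] := by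
  induction p with
  | nil => rfl
  | cons c cs ih =>
    have hc : ¬ (c = c0) := fun he => h (he ▸ List.mem_cons_self)
    have hcs : c0 ∉ cs := fun hm => h (List.mem_cons_of_mem _ hm)
    simp [pvSplitc, hc, ih hcs]

lemma pvSplitc_mem (c0 : Char) (p : List Char) (h : c0 ∈ p) :
    pvSplitc c0 p = p.takeWhile (· ≠ c0) :: pvSplitc c0 ((p.dropWhile (· ≠ c0)).tail) := by
  induction p with
  | nil => cases h
  | cons c cs ih =>
    by_cases hc : c = c0
    · subst hc
      simp [pvSplitc]
    · have hcs : c0 ∈ cs := by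
        cases List.mem_cons.mp h with
        | inl he => exact absurd he.symm hc
        | inr hm => exact hm
      obtain ⟨a, r, hr⟩ := List.ne_nil_iff_exists_cons.mp (pvSplitc_ne_nil c0 cs)
      simp only [pvSplitc, if_neg hc]
      rw [ih hcs]
      simp [hc]

-- per-piece congruence of the filtered params under ¬ pvBadPiece
lemma pvPiece_congr (p : List Char) (hnb : pvBadPiece p = false)
    (dA dB : PySem.Dict (List Char) (List Char)) (h : pvFilt dA = pvFilt dB) :
    pvFilt (pvStepA dA p) = pvFilt (pvStepB dB p) := by
  by_cases hm : '=' ∈ p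
  · by_cases hm2 : '=' ∈ (p.dropWhile (· ≠ '=')).tail
    · -- three or more fields: neither program's key names a standard parameter
      obtain ⟨a, r, hr⟩ :=
        List.ne_nil_iff_exists_cons.mp (pvSplitc_ne_nil '=' ((p.dropWhile (· ≠ '=')).tail.dropWhile (· ≠ '=')).tail)
      have hfs : pvSplitc '=' p = p.takeWhile (· ≠ '=') ::
          (p.dropWhile (· ≠ '=')).tail.takeWhile (· ≠ '=') ::
          pvSplitc '=' ((p.dropWhile (· ≠ '=')).tail.dropWhile (· ≠ '=')).tail := by
        rw [pvSplitc_mem '=' p hm, pvSplitc_mem '=' _ hm2]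
      have hlen : 3 ≤ (pvSplitc '=' p).length := by
        rw [hfs, hr]; simp
      have hnb' : pvPk (PySem.Chars.strip
            ((pvSplitc '=' p).getD ((pvSplitc '=' p).length - 2) [])) = false ∧
          pvPk (PySem.Chars.strip ((pvSplitc '=' p).headI)) = false := by
        unfold pvBadPiece at hnb
        simp only [Bool.and_eq_false_iff, decide_eq_false_iff_not, not_le,
          Bool.or_eq_false_iff] at hnb
        cases hnb with
        | inl h' => omega
        | inr h' => exact ⟨h'.1, h'.2⟩
      have hA : pvFilt (pvStepA dA p) = pvFilt dA := by
        unfold pvStepA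
        rw [if_neg (by omega)]
        dsimp only
        split
        · rfl
        · exact pvFilt_insert_false _ _ _ hnb'.1
      have hB : pvFilt (pvStepB dB p) = pvFilt dB := by
        unfold pvStepB
        dsimp only
        split
        · refine pvFilt_insert_false _ _ _ ?_
          rw [← pvSplitc_headI_takeWhile]
          exact hnb'.2
        · rfl
      rw [hA, hB, h]
    · -- exactly two fields: both insert the same key/value (or both skip)
      have hfs : pvSplitc '=' p =
          [p.takeWhile (· ≠ '='), (p.dropWhile (· ≠ '=')).tail] := by
        rw [pvSplitc_mem '=' p hm, pvSplitc_not_mem '=' _ hm2]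
      unfold pvStepA pvStepB
      rw [hfs]
      dsimp only
      simp only [List.length_cons, List.length_nil, List.getD_cons_zero, List.getD_cons_succ,
        ne_eq, decide_not, Nat.add_sub_cancel]
      norm_num
      by_cases hkey : PySem.Chars.strip (p.takeWhile (fun x => !decide (x = '='))) = []
      · rw [if_pos hkey, if_neg (by simp [hm, hkey])]
        exact h
      · rw [if_neg hkey, if_pos ⟨hm, hkey⟩]
        exact pvFilt_insert_congr dA dB _ _ h
  · -- no '=': both skip
    have hfs : pvSplitc '=' p = [p] := pvSplitc_not_mem '=' p hm
    unfold pvStepA pvStepB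
    rw [hfs]
    dsimp only
    rw [if_pos (by simp), if_neg (by simp [hm])]
    exact h

lemma pvFold_congr (ps : List (List Char)) (hnb : ∀ p ∈ ps, pvBadPiece p = false) :
    ∀ (dA dB : PySem.Dict (List Char) (List Char)), pvFilt dA = pvFilt dB →
    pvFilt (ps.foldl pvStepA dA) = pvFilt (ps.foldl pvStepB dB) := by
  induction ps with
  | nil => intro dA dB h; exact h
  | cons p t ih =>
    intro dA dB h
    exact ih (fun q hq => hnb q (List.mem_cons_of_mem _ hq)) _ _
      (pvPiece_congr p (hnb p List.mem_cons_self) dA dB h)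

-- the result-building fold only sees the S-filtered items
def pvCanon (r : PySem.Dict String String) (kv : List Char × List Char) :
    PySem.Dict String String :=
  r.insert (String.ofList (PySem.Chars.lower kv.1)) (String.ofList kv.2)

lemma pvMapA_eq (r : PySem.Dict String String) (kv : List Char × List Char) :
    (if PySem.Chars.lower kv.1 = "for".toList then r.insert "for" (String.ofList kv.2)
     else if PySem.Chars.lower kv.1 = "by".toList then r.insert "by" (String.ofList kv.2)
     else if PySem.Chars.lower kv.1 = "host".toList then r.insert "host" (String.ofList kv.2)
     else if PySem.Chars.lower kv.1 = "proto".toList then r.insert "proto" (String.ofList kv.2)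
     else r) = if pvP kv then pvCanon r kv else r := by
  by_cases h1 : PySem.Chars.lower kv.1 = "for".toList
  · simp [h1, pvP, pvPk, pvSKeys, pvCanon]
  · by_cases h2 : PySem.Chars.lower kv.1 = "by".toList
    · simp [h2, pvP, pvPk, pvSKeys, pvCanon]
    · by_cases h3 : PySem.Chars.lower kv.1 = "host".toList
      · simp [h3, pvP, pvPk, pvSKeys, pvCanon]
      · by_cases h4 : PySem.Chars.lower kv.1 = "proto".toList
        · simp [h4, pvP, pvPk, pvSKeys, pvCanon]
        · have h1' : PySem.Chars.lower kv.1 ≠ ['f', 'o', 'r'] := by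
            intro he; exact h1 (by rw [he]; decide)
          have h2' : PySem.Chars.lower kv.1 ≠ ['b', 'y'] := by
            intro he; exact h2 (by rw [he]; decide)
          have h3' : PySem.Chars.lower kv.1 ≠ ['h', 'o', 's', 't'] := by
            intro he; exact h3 (by rw [he]; decide)
          have h4' : PySem.Chars.lower kv.1 ≠ ['p', 'r', 'o', 't', 'o'] := by
            intro he; exact h4 (by rw [he]; decide)
          simp [h1', h2', h3', h4', pvP, pvPk, pvSKeys]

lemma pvMapB_eq (r : PySem.Dict String String) (kv : List Char × List Char) :
    (let k := PySem.Chars.lower kv.1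
     if k ∈ [("for".toList), ("by".toList), ("host".toList), ("proto".toList)] then
       r.insert (String.ofList k) (String.ofList kv.2)
     else r) = if pvP kv then pvCanon r kv else r := by
  dsimp only
  by_cases h : PySem.Chars.lower kv.1 ∈
      [("for".toList), ("by".toList), ("host".toList), ("proto".toList)]
  · rw [if_pos h, if_pos (by simpa [pvP, pvPk, pvSKeys] using h)]
    rfl
  · rw [if_neg h, if_neg (by simpa [pvP, pvPk, pvSKeys] using h)]

lemma pvResultFoldA (d : PySem.Dict (List Char) (List Char)) (r : PySem.Dict String String) :
    d.items.foldl (fun r kv =>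
      if PySem.Chars.lower kv.1 = "for".toList then r.insert "for" (String.ofList kv.2)
      else if PySem.Chars.lower kv.1 = "by".toList then r.insert "by" (String.ofList kv.2)
      else if PySem.Chars.lower kv.1 = "host".toList then r.insert "host" (String.ofList kv.2)
      else if PySem.Chars.lower kv.1 = "proto".toList then r.insert "proto" (String.ofList kv.2)
      else r) r = (pvFilt d).foldl pvCanon r := by
  unfold pvFilt
  rw [List.foldl_filter]
  exact PySem.List.foldl_congr_mem d.items _ _ r (fun r kv _ => pvMapA_eq r kv)

lemma pvResultFoldB (d : PySem.Dict (List Char) (List Char)) (r : PySem.Dict String String) :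
    d.items.foldl (fun r kv =>
      let k := PySem.Chars.lower kv.1
      if k ∈ [("for".toList), ("by".toList), ("host".toList), ("proto".toList)] then
        r.insert (String.ofList k) (String.ofList kv.2)
      else r) r = (pvFilt d).foldl pvCanon r := by
  unfold pvFilt
  rw [List.foldl_filter]
  exact PySem.List.foldl_congr_mem d.items _ _ r (fun r kv _ => pvMapB_eq r kv)

-- ===== VERDICT (by name: the statement is the Claim_ definition above) =====
theorem parse_forwarded_header_spec : Claim_equal_parse_forwarded_header := by
  intro s _ hpre
  unfold Spec_parse_forwarded_header parse_forwarded_header parse_forwarded_header_alt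
  have hD : ∀ seg ∈ pvSplitc ',' s.toList,
      ∀ p ∈ pvSplitc ';' (PySem.Chars.strip seg), pvBadPiece p = false := by
    intro seg hseg p hp
    rw [pvSplitc_eq_splitOn] at hseg hp
    have hc := hpre seg hseg p hp
    have h3 : ¬ 3 ≤ (pvSplitc '=' p).length := by rw [pvSplitc_length]; omega
    unfold pvBadPiece
    simp [h3]
  by_cases hn : s.toList = []
  · rw [hn, if_pos rfl]
    decide
  · rw [if_neg hn]
    dsimp only
    rw [pvSplitOn_single ',']
    congr 1
    apply PySem.List.foldl_congr_mem
    intro result seg hseg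
    dsimp only
    by_cases hstrip : PySem.Chars.strip seg = []
    · simp [hstrip]
    · rw [if_neg hstrip, if_neg hstrip, pvSplitOn_single ';']
      rw [show (pvFlush (pvLoopA (PySem.Chars.strip seg) PySem.Dict.empty [] []).1
            (pvLoopA (PySem.Chars.strip seg) PySem.Dict.empty [] []).2.1
            (pvLoopA (PySem.Chars.strip seg) PySem.Dict.empty [] []).2.2) =
          (pvSplitc ';' (PySem.Chars.strip seg)).foldl pvStepA PySem.Dict.empty from
          pvParams_eq _]
      rw [pvResultFoldA, pvResultFoldB]
      rw [pvFold_congr (pvSplitc ';' (PySem.Chars.strip seg)) (hD seg hseg)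
            PySem.Dict.empty PySem.Dict.empty rfl]
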